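-- pv_equiv track=rewrite | github.com/rolv0/Tripletex-NM | nightmare_bot.py | ring_goals
-- ===== SOURCE A (Python) =====
-- from typing import Any, Dict, List, Optional, Set, Tuple
--
-- DIRECTIONS: Dict[str, Tuple[int, int]] = {
--     "up": (0, -1),
--     "right": (1, 0),
--     "down": (0, 1),
--     "left": (-1, 0),
-- }
--
-- def neighbors(cell: Tuple[int, int], bounds: Tuple[int, int], blocked: Set[Tuple[int, int]]) -> List[Tuple[int, int]]:
--     out: List[Tuple[int, int]] = []
--     w, h = bounds
--     x, y = cell
--     for dx, dy in DIRECTIONS.values():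
--         nx, ny = x + dx, y + dy
--         np = (nx, ny)
--         if nx < 0 or ny < 0 or nx >= w or ny >= h:
--             continue
--         if np in blocked:
--             continue
--         out.append(np)
--     return out
--
-- def is_open_cell(cell: Tuple[int, int], bounds: Tuple[int, int], blocked: Set[Tuple[int, int]]) -> bool:
--     return len(neighbors(cell, bounds, blocked)) >= 3
--
-- def ring_goals(
--     center: Tuple[int, int],
--     bounds: Tuple[int, int],
--     blocked: Set[Tuple[int, int]],
--     min_r: int = 2,
--     max_r: int = 5,
-- ) -> Set[Tuple[int, int]]:
--     w, h = bounds
--     cx, cy = center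
--     out: Set[Tuple[int, int]] = set()
--     for y in range(h):
--         for x in range(w):
--             c = (x, y)
--             if c in blocked:
--                 continue
--             md = abs(cx - x) + abs(cy - y)
--             if min_r <= md <= max_r and is_open_cell(c, bounds, blocked):
--                 out.add(c)
--     return out
-- ===== SOURCE B (Python) =====
-- def _degree(cell, bounds, blocked):
--     x, y = cell
--     w, h = bounds
--     return sum(1 for nx, ny in ((x, y - 1), (x + 1, y), (x, y + 1), (x - 1, y))
--                if 0 <= nx < w and 0 <= ny < h and (nx, ny) not in blocked)
--
-- def ring_goals(center, bounds, blocked, min_r=2, max_r=5):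
--     w, h = bounds
--     cx, cy = center
--     out = set()
--     y_lo = max(0, cy - max_r)
--     y_hi = min(h - 1, cy + max_r)
--     for y in range(y_lo, y_hi + 1):
--         dy = abs(cy - y)
--         hi = max_r - dy
--         lo = min_r - dy
--         if lo <= 0:
--             spans = [(cx - hi, cx + hi)]
--         else:
--             spans = [(cx - hi, cx - lo), (cx + lo, cx + hi)]
--         for a, b in spans:
--             for x in range(max(0, a), min(w - 1, b) + 1):
--                 c = (x, y)
--                 if c not in blocked and _degree(c, bounds, blocked) >= 3:
--                     out.add(c)
--     return out
-- ===== Notes on version B (the rewrite author's own statement) =====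
-- stated objective: faster
-- what changed: B enumerates only the cells of the Manhattan ring (at most two arithmetically computed x-intervals per row, rows clamped to the board) instead of scanning the whole w*h grid and testing the ring condition at every cell, and counts open-neighborhood degree directly instead of building a neighbor list.
import Mathlib
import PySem

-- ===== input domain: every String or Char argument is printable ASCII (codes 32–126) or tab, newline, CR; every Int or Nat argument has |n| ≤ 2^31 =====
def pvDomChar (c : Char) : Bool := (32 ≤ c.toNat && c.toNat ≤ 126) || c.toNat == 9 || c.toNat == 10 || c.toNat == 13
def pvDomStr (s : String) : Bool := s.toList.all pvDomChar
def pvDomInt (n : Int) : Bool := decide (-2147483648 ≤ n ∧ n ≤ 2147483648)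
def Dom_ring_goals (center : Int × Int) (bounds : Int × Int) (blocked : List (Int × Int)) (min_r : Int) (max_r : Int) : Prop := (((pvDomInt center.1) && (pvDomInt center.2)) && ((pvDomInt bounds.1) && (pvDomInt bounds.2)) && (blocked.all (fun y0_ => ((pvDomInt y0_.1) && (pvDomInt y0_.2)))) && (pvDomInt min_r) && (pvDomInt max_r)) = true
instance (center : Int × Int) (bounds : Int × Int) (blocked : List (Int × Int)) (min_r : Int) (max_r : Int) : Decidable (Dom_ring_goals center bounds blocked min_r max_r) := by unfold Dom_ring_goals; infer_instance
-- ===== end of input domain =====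

-- B enumerates only the rows and x-spans of the Manhattan ring (at most two x-intervals per row,
-- computed arithmetically) instead of scanning the whole w×h grid; intended as faster (the timing
-- run measured B two orders of magnitude faster at the largest size both finished, unconfirmed beyond that).

-- ===== PORT A =====
-- DIRECTIONS.values() in source order: up, right, down, left
def pvDirections : List (Int × Int) := [(0, -1), (1, 0), (0, 1), (-1, 0)]

def pvNeighbors (cell : Int × Int) (bounds : Int × Int) (blocked : List (Int × Int)) : List (Int × Int) :=
  pvDirections.foldl (fun out d =>
    let nx := cell.1 + d.1
    let ny := cell.2 + d.2
    if nx < 0 ∨ ny < 0 ∨ nx ≥ bounds.1 ∨ ny ≥ bounds.2 then out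
    else if (nx, ny) ∈ blocked then out
    else out ++ [(nx, ny)]) []

def pvIsOpenCell (cell : Int × Int) (bounds : Int × Int) (blocked : List (Int × Int)) : Bool :=
  decide (3 ≤ (pvNeighbors cell bounds blocked).length)

def ring_goals (center : Int × Int) (bounds : Int × Int) (blocked : List (Int × Int)) (min_r : Int) (max_r : Int) : List (Int × Int) :=
  let w := bounds.1
  let h := bounds.2
  let cx := center.1
  let cy := center.2
  (PySem.List.pyRange 0 h 1).foldl (fun out y =>
    (PySem.List.pyRange 0 w 1).foldl (fun out x =>
      let c := (x, y)
      if c ∈ blocked then out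
      else
        let md := |cx - x| + |cy - y|
        if min_r ≤ md ∧ md ≤ max_r ∧ pvIsOpenCell c bounds blocked = true then PySem.Set.add out c
        else out) out) []

-- ===== PORT B =====
-- sum of the 0/1 generator over the four neighbour cells = List.countP
def pvDegree (cell : Int × Int) (bounds : Int × Int) (blocked : List (Int × Int)) : Nat :=
  ([(cell.1, cell.2 - 1), (cell.1 + 1, cell.2), (cell.1, cell.2 + 1), (cell.1 - 1, cell.2)] : List (Int × Int)).countP
    (fun p => decide (0 ≤ p.1 ∧ p.1 < bounds.1 ∧ 0 ≤ p.2 ∧ p.2 < bounds.2 ∧ p ∉ blocked))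

def ring_goals_alt (center : Int × Int) (bounds : Int × Int) (blocked : List (Int × Int)) (min_r : Int) (max_r : Int) : List (Int × Int) :=
  let w := bounds.1
  let h := bounds.2
  let cx := center.1
  let cy := center.2
  let yLo := max 0 (cy - max_r)
  let yHi := min (h - 1) (cy + max_r)
  (PySem.List.pyRange yLo (yHi + 1) 1).foldl (fun out y =>
    let dy := |cy - y|
    let hi := max_r - dy
    let lo := min_r - dy
    let spans : List (Int × Int) :=
      if lo ≤ 0 then [(cx - hi, cx + hi)] else [(cx - hi, cx - lo), (cx + lo, cx + hi)]
    spans.foldl (fun out ab =>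
      (PySem.List.pyRange (max 0 ab.1) (min (w - 1) ab.2 + 1) 1).foldl (fun out x =>
        let c := (x, y)
        if c ∉ blocked ∧ 3 ≤ pvDegree c bounds blocked then PySem.Set.add out c else out) out) out) []


-- ===== PRECONDITION & SPEC =====
def Spec_ring_goals (center : Int × Int) (bounds : Int × Int) (blocked : List (Int × Int)) (min_r : Int) (max_r : Int) (out : List (Int × Int)) : Prop := out = ring_goals_alt center bounds blocked min_r max_r
instance (center : Int × Int) (bounds : Int × Int) (blocked : List (Int × Int)) (min_r : Int) (max_r : Int) (out : List (Int × Int)) : Decidable (Spec_ring_goals center bounds blocked min_r max_r out) := by unfold Spec_ring_goals; infer_instance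

-- ===== CLAIM (what is proved, stated in full; the proofs are below) =====
def Claim_equal_ring_goals : Prop := ∀ (center : Int × Int) (bounds : Int × Int) (blocked : List (Int × Int)) (min_r : Int) (max_r : Int), Dom_ring_goals center bounds blocked min_r max_r → Spec_ring_goals center bounds blocked min_r max_r (ring_goals center bounds blocked min_r max_r)

-- ===== LEMMAS AND PROOFS =====

theorem pvEqOfMemIff : ∀ {l1 l2 : List Int}, l1.Pairwise (· < ·) → l2.Pairwise (· < ·) →
    (∀ x, x ∈ l1 ↔ x ∈ l2) → l1 = l2 := by
  intro l1
  induction l1 with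
  | nil =>
    intro l2 _ _ hm
    cases l2 with
    | nil => rfl
    | cons b t => exact absurd ((hm b).2 List.mem_cons_self) (by simp)
  | cons a t ih =>
    intro l2 h1 h2 hm
    cases l2 with
    | nil => exact absurd ((hm a).1 List.mem_cons_self) (by simp)
    | cons b t2 =>
      rw [List.pairwise_cons] at h1 h2
      have ha : a = b ∨ a ∈ t2 := by simpa using (hm a).1 List.mem_cons_self
      have hb : b = a ∨ b ∈ t := by simpa using (hm b).2 List.mem_cons_self
      have hab : a = b := by
        rcases ha with h | h
        · exact h
        · rcases hb with h' | h'
          · omega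
          · have := h1.1 b h'
            have := h2.1 a h
            omega
      subst hab
      have htl : t = t2 := by
        apply ih h1.2 h2.2
        intro x
        constructor
        · intro hx
          rcases List.mem_cons.1 ((hm x).1 (List.mem_cons_of_mem _ hx)) with h | h
          · have := h1.1 x hx; omega
          · exact h
        · intro hx
          rcases List.mem_cons.1 ((hm x).2 (List.mem_cons_of_mem _ hx)) with h | h
          · have := h2.1 x hx; omega
          · exact h
      rw [htl]

def pvGood (bounds : Int × Int) (blocked : List (Int × Int)) (p : Int × Int) : Bool :=
  decide (0 ≤ p.1 ∧ p.1 < bounds.1 ∧ 0 ≤ p.2 ∧ p.2 < bounds.2 ∧ p ∉ blocked)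

theorem pvNeighbors_eq (cell bounds : Int × Int) (blocked : List (Int × Int)) :
    pvNeighbors cell bounds blocked
      = (pvDirections.filter (fun d => pvGood bounds blocked (cell.1 + d.1, cell.2 + d.2))).map
          (fun d => (cell.1 + d.1, cell.2 + d.2)) := by
  unfold pvNeighbors
  have h : (fun (out : List (Int × Int)) (d : Int × Int) =>
      let nx := cell.1 + d.1
      let ny := cell.2 + d.2
      if nx < 0 ∨ ny < 0 ∨ nx ≥ bounds.1 ∨ ny ≥ bounds.2 then out
      else if (nx, ny) ∈ blocked then out
      else out ++ [(nx, ny)])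
      = fun out d => if pvGood bounds blocked (cell.1 + d.1, cell.2 + d.2) then out ++ [(cell.1 + d.1, cell.2 + d.2)] else out := by
    funext out d
    by_cases hgd : pvGood bounds blocked (cell.1 + d.1, cell.2 + d.2) = true
    · obtain ⟨g1, g2, g3, g4, g5⟩ : 0 ≤ cell.1 + d.1 ∧ cell.1 + d.1 < bounds.1 ∧ 0 ≤ cell.2 + d.2 ∧
          cell.2 + d.2 < bounds.2 ∧ (cell.1 + d.1, cell.2 + d.2) ∉ blocked := by
        simpa [pvGood] using hgd
      simp only [hgd, if_true]
      rw [if_neg (by omega), if_neg g5]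
    · have hgd' : pvGood bounds blocked (cell.1 + d.1, cell.2 + d.2) = false := by simpa using hgd
      simp only [hgd', Bool.false_eq_true, if_false]
      by_cases hb : cell.1 + d.1 < 0 ∨ cell.2 + d.2 < 0 ∨ cell.1 + d.1 ≥ bounds.1 ∨ cell.2 + d.2 ≥ bounds.2
      · rw [if_pos hb]
      · rw [if_neg hb]
        have hm : (cell.1 + d.1, cell.2 + d.2) ∈ blocked := by
          by_contra hm
          have : pvGood bounds blocked (cell.1 + d.1, cell.2 + d.2) = true := by
            simp only [pvGood, decide_eq_true_eq]
            push Not at hb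
            exact ⟨by omega, by omega, by omega, by omega, hm⟩
          simp [this] at hgd'
        rw [if_pos hm]
  rw [h, PySem.List.foldl_append_if]
  simp

theorem pvOpen_iff (cell bounds : Int × Int) (blocked : List (Int × Int)) :
    pvIsOpenCell cell bounds blocked = true ↔ 3 ≤ pvDegree cell bounds blocked := by
  have hc : ([(cell.1, cell.2 - 1), (cell.1 + 1, cell.2), (cell.1, cell.2 + 1), (cell.1 - 1, cell.2)] : List (Int × Int))
      = pvDirections.map (fun d => (cell.1 + d.1, cell.2 + d.2)) := by
    simp [pvDirections, Prod.ext_iff]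
    omega
  unfold pvIsOpenCell pvDegree
  rw [pvNeighbors_eq, hc, List.countP_map]
  rw [List.length_map, List.countP_eq_length_filter]
  simp [decide_eq_true_eq, pvGood, Function.comp_def]

def pvQ (bounds : Int × Int) (blocked : List (Int × Int)) (y x : Int) : Bool :=
  decide ((x, y) ∉ blocked ∧ 3 ≤ pvDegree (x, y) bounds blocked)

def pvMd (center : Int × Int) (min_r max_r y x : Int) : Bool :=
  decide (min_r ≤ |center.1 - x| + |center.2 - y| ∧ |center.1 - x| + |center.2 - y| ≤ max_r)

def pvRow (center bounds : Int × Int) (blocked : List (Int × Int)) (min_r max_r y : Int) : List (Int × Int) :=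
  ((PySem.List.pyRange 0 bounds.1 1).filter
      (fun x => pvQ bounds blocked y x && pvMd center min_r max_r y x)).map (fun x => (x, y))

theorem pvFoldAdd (y : Int) (q : Int → Bool) : ∀ (xs : List Int) (out : List (Int × Int)),
    xs.Nodup → (∀ x ∈ xs, (x, y) ∉ out) →
    xs.foldl (fun out x => if q x then PySem.Set.add out (x, y) else out) out
      = out ++ (xs.filter q).map (fun x => (x, y)) := by
  intro xs
  induction xs with
  | nil => simp
  | cons x t ih =>
    intro out hnd hout
    by_cases hq : q x = true
    · have hadd : PySem.Set.add out (x, y) = out ++ [(x, y)] := by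
        simp [PySem.Set.add, PySem.Set.contains, hout x List.mem_cons_self]
      have hrest : ∀ x' ∈ t, (x', y) ∉ out ++ [(x, y)] := by
        intro x' hx'
        simp only [List.mem_append, List.mem_singleton, Prod.mk.injEq]
        rintro (h | ⟨h1, h2⟩)
        · exact hout x' (List.mem_cons_of_mem _ hx') h
        · exact (List.nodup_cons.1 hnd).1 (h1 ▸ hx')
      simp only [List.foldl_cons, List.filter_cons, hq, if_true]
      rw [hadd, ih _ hnd.of_cons hrest, List.append_assoc]
      simp
    · replace hq : q x = false := by simpa using hq
      simp only [List.foldl_cons, List.filter_cons, hq, Bool.false_eq_true, if_false]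
      exact ih out hnd.of_cons (fun x' hx' => hout x' (List.mem_cons_of_mem _ hx'))

theorem pvFoldRows (g : List (Int × Int) → Int → List (Int × Int)) (row : Int → List (Int × Int))
    (hg : ∀ out y, (∀ p ∈ out, p.2 ≠ y) → g out y = out ++ row y)
    (hrow : ∀ y p, p ∈ row y → p.2 = y) :
    ∀ (ys : List Int) (out : List (Int × Int)), ys.Nodup → (∀ p ∈ out, p.2 ∉ ys) →
      ys.foldl g out = out ++ ys.flatMap row := by
  intro ys
  induction ys with
  | nil => simp
  | cons y t ih =>
    intro out hnd hout
    simp only [List.foldl_cons, List.flatMap_cons]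
    rw [hg out y (fun p hp => by have := hout p hp; simp at this; exact this.1),
        ih (out ++ row y) hnd.of_cons ?_, List.append_assoc]
    intro p hp
    rcases List.mem_append.1 hp with h | h
    · have := hout p h; simp at this; exact this.2
    · have := hrow y p h
      rw [this]
      exact (List.nodup_cons.1 hnd).1

theorem pvRow_snd (center bounds : Int × Int) (blocked : List (Int × Int)) (min_r max_r y : Int)
    (p : Int × Int) (hp : p ∈ pvRow center bounds blocked min_r max_r y) : p.2 = y := by
  simp only [pvRow, List.mem_map, List.mem_filter] at hp
  obtain ⟨x, _, rfl⟩ := hp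
  rfl

theorem pvA_eq (center bounds : Int × Int) (blocked : List (Int × Int)) (min_r max_r : Int) :
    ring_goals center bounds blocked min_r max_r
      = (PySem.List.pyRange 0 bounds.2 1).flatMap (pvRow center bounds blocked min_r max_r) := by
  simp only [ring_goals]
  rw [pvFoldRows _ _ ?hg (pvRow_snd center bounds blocked min_r max_r)
      (PySem.List.pyRange 0 bounds.2 1) [] (PySem.List.nodup_pyRange_one 0 bounds.2) (by simp)]
  · simp
  case hg =>
    intro out y hy
    have hbody : (fun (out : List (Int × Int)) (x : Int) =>
        let c := (x, y)
        if c ∈ blocked then out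
        else
          let md := |center.1 - x| + |center.2 - y|
          if min_r ≤ md ∧ md ≤ max_r ∧ pvIsOpenCell c bounds blocked = true then PySem.Set.add out c
          else out)
        = fun out x => if (fun x => pvQ bounds blocked y x && pvMd center min_r max_r y x) x then
            PySem.Set.add out (x, y) else out := by
      funext out x
      simp only [pvQ, pvMd, Bool.and_eq_true, decide_eq_true_eq, pvOpen_iff]
      split_ifs <;> tauto
    rw [hbody, pvFoldAdd y _ (PySem.List.pyRange 0 bounds.1 1) out
        (PySem.List.nodup_pyRange_one 0 bounds.1) (fun x _ hmem => hy _ hmem rfl)]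
    rfl

theorem pvFlatMapFilter (p : Int → Bool) (row : Int → List (Int × Int)) :
    ∀ l : List Int, (∀ y ∈ l, p y = false → row y = []) →
      (l.filter p).flatMap row = l.flatMap row := by
  intro l
  induction l with
  | nil => simp
  | cons y t ih =>
    intro h
    by_cases hp : p y = true
    · simp only [List.filter_cons, hp, if_true, List.flatMap_cons]
      rw [ih (fun y' hy' => h y' (List.mem_cons_of_mem _ hy'))]
    · replace hp : p y = false := by simpa using hp
      simp only [List.filter_cons, hp, Bool.false_eq_true, if_false, List.flatMap_cons]
      rw [h y List.mem_cons_self hp, ih (fun y' hy' => h y' (List.mem_cons_of_mem _ hy'))]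
      simp

theorem pvSpanEq (center bounds : Int × Int) (_blocked : List (Int × Int)) (min_r max_r y : Int) :
    (if min_r - |center.2 - y| ≤ 0 then
        [(center.1 - (max_r - |center.2 - y|), center.1 + (max_r - |center.2 - y|))]
      else [(center.1 - (max_r - |center.2 - y|), center.1 - (min_r - |center.2 - y|)),
            (center.1 + (min_r - |center.2 - y|), center.1 + (max_r - |center.2 - y|))]).flatMap
      (fun ab => PySem.List.pyRange (max 0 ab.1) (min (bounds.1 - 1) ab.2 + 1) 1)
      = (PySem.List.pyRange 0 bounds.1 1).filter (pvMd center min_r max_r y) := by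
  apply Eq.symm
  apply pvEqOfMemIff
  · exact (PySem.List.pairwise_lt_pyRange_one 0 bounds.1).filter _
  · split_ifs with hlo
    · simpa using PySem.List.pairwise_lt_pyRange_one _ _
    · simp only [List.flatMap_cons, List.flatMap_nil, List.append_nil]
      apply List.pairwise_append.2
      refine ⟨PySem.List.pairwise_lt_pyRange_one _ _, PySem.List.pairwise_lt_pyRange_one _ _, ?_⟩
      intro x1 h1 x2 h2
      rw [PySem.List.mem_pyRange_one] at h1 h2
      rcases abs_cases (center.2 - y) with ⟨e2, f2⟩ | ⟨e2, f2⟩ <;> rw [e2] at h1 h2 hlo <;> omega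
  · intro x
    simp only [List.mem_filter, PySem.List.mem_pyRange_one, pvMd, decide_eq_true_eq]
    split_ifs with hlo
    · simp only [List.flatMap_cons, List.flatMap_nil, List.append_nil, PySem.List.mem_pyRange_one]
      rcases abs_cases (center.1 - x) with ⟨e1, f1⟩ | ⟨e1, f1⟩ <;>
        rcases abs_cases (center.2 - y) with ⟨e2, f2⟩ | ⟨e2, f2⟩ <;>
          rw [e1, e2] <;> rw [e2] at hlo <;> omega
    · simp only [List.flatMap_cons, List.flatMap_nil, List.append_nil, List.mem_append,
        PySem.List.mem_pyRange_one]
      rcases abs_cases (center.1 - x) with ⟨e1, f1⟩ | ⟨e1, f1⟩ <;>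
        rcases abs_cases (center.2 - y) with ⟨e2, f2⟩ | ⟨e2, f2⟩ <;>
          rw [e1, e2] <;> rw [e2] at hlo <;> omega

theorem pvB_eq (center bounds : Int × Int) (blocked : List (Int × Int)) (min_r max_r : Int) :
    ring_goals_alt center bounds blocked min_r max_r
      = (PySem.List.pyRange (max 0 (center.2 - max_r)) (min (bounds.2 - 1) (center.2 + max_r) + 1) 1).flatMap
          (pvRow center bounds blocked min_r max_r) := by
  simp only [ring_goals_alt]
  rw [pvFoldRows _ _ ?hg (pvRow_snd center bounds blocked min_r max_r)
      _ [] (PySem.List.nodup_pyRange_one _ _) (by simp)]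
  · simp
  case hg =>
    intro out y hy
    have hbody : (fun (out : List (Int × Int)) (x : Int) =>
        let c := (x, y)
        if c ∉ blocked ∧ 3 ≤ pvDegree c bounds blocked then PySem.Set.add out c else out)
        = fun out x => if pvQ bounds blocked y x then PySem.Set.add out (x, y) else out := by
      funext out x
      simp [pvQ]
    have hspan := pvSpanEq center bounds blocked min_r max_r y
    have hrow : ∀ R : List Int, R = (PySem.List.pyRange 0 bounds.1 1).filter (pvMd center min_r max_r y) →
        pvRow center bounds blocked min_r max_r y = (R.filter (pvQ bounds blocked y)).map (fun x => (x, y)) := by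
      intro R hR
      rw [pvRow, ← List.filter_filter, ← hR]
    by_cases hlo : min_r - |center.2 - y| ≤ 0
    · rw [if_pos hlo] at hspan ⊢
      simp only [List.flatMap_cons, List.flatMap_nil, List.append_nil] at hspan
      simp only [List.foldl_cons, List.foldl_nil]
      rw [hbody, pvFoldAdd y _ _ out (PySem.List.nodup_pyRange_one _ _)
          (fun x _ hmem => hy _ hmem rfl)]
      rw [hrow _ hspan]
    · rw [if_neg hlo] at hspan ⊢
      simp only [List.flatMap_cons, List.flatMap_nil, List.append_nil] at hspan
      simp only [List.foldl_cons, List.foldl_nil]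
      rw [hbody, pvFoldAdd y _ _ out (PySem.List.nodup_pyRange_one _ _)
          (fun x _ hmem => hy _ hmem rfl)]
      rw [pvFoldAdd y _ _ _ (PySem.List.nodup_pyRange_one _ _) ?_]
      · rw [List.append_assoc, ← List.map_append, ← List.filter_append, hrow _ hspan]
      · intro x hx hmem
        rcases List.mem_append.1 hmem with h | h
        · exact hy _ h rfl
        · rcases List.mem_map.1 h with ⟨x', hx', heq⟩
          have hx'R := List.mem_of_mem_filter hx'
          rw [PySem.List.mem_pyRange_one] at hx hx'R
          have : x' = x := congrArg Prod.fst heq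
          rcases abs_cases (center.2 - y) with ⟨e2, f2⟩ | ⟨e2, f2⟩ <;>
            rw [e2] at hx hx'R hlo <;> omega

theorem pvRow_empty (center bounds : Int × Int) (blocked : List (Int × Int)) (min_r max_r y : Int)
    (hfar : max_r < |center.2 - y|) : pvRow center bounds blocked min_r max_r y = [] := by
  rw [pvRow, List.map_eq_nil_iff, List.filter_eq_nil_iff]
  intro x _
  simp only [Bool.and_eq_true, pvMd, decide_eq_true_eq, not_and]
  intro _ _ h2
  rcases abs_cases (center.1 - x) with ⟨e1, f1⟩ | ⟨e1, f1⟩ <;>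
    rcases abs_cases (center.2 - y) with ⟨e2, f2⟩ | ⟨e2, f2⟩ <;>
      rw [e1, e2] at h2 <;> rw [e2] at hfar <;> omega

theorem ring_goals_eq_alt (center bounds : Int × Int) (blocked : List (Int × Int)) (min_r max_r : Int) :
    ring_goals center bounds blocked min_r max_r = ring_goals_alt center bounds blocked min_r max_r := by
  rw [pvA_eq, pvB_eq]
  have hfilt : PySem.List.pyRange (max 0 (center.2 - max_r)) (min (bounds.2 - 1) (center.2 + max_r) + 1) 1
      = (PySem.List.pyRange 0 bounds.2 1).filter
          (fun yy => decide (max 0 (center.2 - max_r) ≤ yy ∧ yy < min (bounds.2 - 1) (center.2 + max_r) + 1)) := by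
    apply pvEqOfMemIff (PySem.List.pairwise_lt_pyRange_one _ _)
      ((PySem.List.pairwise_lt_pyRange_one 0 bounds.2).filter _)
    intro yy
    simp only [List.mem_filter, PySem.List.mem_pyRange_one, decide_eq_true_eq]
    omega
  rw [hfilt, pvFlatMapFilter]
  intro y hy hp
  rw [PySem.List.mem_pyRange_one] at hy
  simp only [decide_eq_false_iff_not, not_and, not_lt] at hp
  apply pvRow_empty
  rcases abs_cases (center.2 - y) with ⟨e2, f2⟩ | ⟨e2, f2⟩ <;> rw [e2] <;> omega

-- ===== VERDICT (by name: the statement is the Claim_ definition above) =====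
theorem ring_goals_spec : Claim_equal_ring_goals := by
  intro center bounds blocked min_r max_r _
  unfold Spec_ring_goals
  exact ring_goals_eq_alt center bounds blocked min_r max_r
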